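-- pv_equiv track=rewrite | github.com/ArcProjet/ARC | primitive.py | growingColor2
-- ===== SOURCE A (Python) =====
-- def gridCopy(grid):
--     res = [[0 for _ in range(len(grid[0]))] for _ in range(len(grid))]
--     for i in range(0, len(grid)):
--         for j in range(0, len(grid[i])):
--             res[i][j] = grid[i][j]
--     return res
--
-- def growingColor2(grid):
--     res = gridCopy(grid)
--     for i in range(1, len(grid)):
--         for j in range(len(grid[0])):
--             if (grid[i][j] == 2):
--                 res[i - 1][j] = 2
--     for k in range(0, len(grid)):
--         for l in range(len(grid[0]) - 2, -1, -1):
--             if (grid[k][l] == 2):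
--                 res[k][l + 1] = 2
--     for m in range(len(grid) - 2, -1, -1):
--         for n in range(len(grid[0])):
--             if (grid[m][n] == 2):
--                 res[m + 1][n] = 2
--     for o in range(len(grid)):
--         for p in range(1, len(grid[0])):
--             if (grid[o][p] == 2):
--                 res[o][p - 1] = 2
--     return res
-- ===== SOURCE B (Python) =====
-- def growingColor2(grid):
--     h = len(grid)
--
--     def out_cell(i, j):
--         row = grid[i]
--         if (i > 0 and grid[i - 1][j] == 2) or \
--            (i + 1 < h and grid[i + 1][j] == 2) or \
--            (j > 0 and row[j - 1] == 2) or \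
--            (j + 1 < len(row) and row[j + 1] == 2):
--             return 2
--         return row[j]
--
--     return [[out_cell(i, j) for j in range(len(grid[i]))] for i in range(h)]
-- ===== Notes on version B (the rewrite author's own statement) =====
-- stated objective: simpler
-- what changed: A scatters writes into a mutable zero-initialised copy over five passes (copy plus four directional passes); B is a pure gather: a nested comprehension that computes each output cell directly as 2 if some in-bounds orthogonal neighbour of the original is 2, else the original value, with no mutation at all.
import Mathlib
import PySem

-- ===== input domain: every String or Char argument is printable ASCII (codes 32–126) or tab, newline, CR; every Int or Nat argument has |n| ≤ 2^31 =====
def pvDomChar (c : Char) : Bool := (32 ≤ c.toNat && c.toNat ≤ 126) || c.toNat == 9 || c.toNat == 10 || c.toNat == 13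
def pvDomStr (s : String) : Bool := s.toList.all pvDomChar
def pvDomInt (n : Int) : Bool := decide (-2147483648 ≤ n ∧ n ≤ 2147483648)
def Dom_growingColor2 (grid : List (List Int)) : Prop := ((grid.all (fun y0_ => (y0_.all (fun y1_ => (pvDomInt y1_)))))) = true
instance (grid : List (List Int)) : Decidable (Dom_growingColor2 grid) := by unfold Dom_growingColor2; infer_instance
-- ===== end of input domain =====

-- A scatters 2-writes from each 2-cell into a mutable copy over four directional passes;
-- B builds the result functionally, computing each cell by reading whether an orthogonal
-- neighbour of the original is 2 (objective: simpler).

-- ===== PORT A =====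
-- res[i][j] = v  (exact for in-range i, j; Pre_ guarantees every index the ports use is in range,
-- where Python would otherwise raise IndexError)
def pvUpd2 (res : List (List Int)) (i j : Nat) (v : Int) : List (List Int) :=
  res.set i ((res.getD i []).set j v)

-- grid[i][j]  (exact for in-range i, j, which Pre_ guarantees at every use)
def pvGet2 (grid : List (List Int)) (i j : Nat) : Int :=
  (grid.getD i []).getD j 0

-- literal port of gridCopy: zero grid of shape len(grid) × len(grid[0]), then copy cell by cell
def gridCopyA (grid : List (List Int)) : List (List Int) :=
  let res := List.replicate grid.length (List.replicate (grid.headD []).length 0)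
  (List.range grid.length).foldl (fun r i =>
    (List.range (grid.getD i []).length).foldl (fun r j =>
      pvUpd2 r i j (pvGet2 grid i j)) r) res

-- literal port of A: copy, then the four directional passes in A's order
-- (range(1,h) = List.range' 1 (h-1); range(w-2,-1,-1) = (List.range (w-1)).reverse, etc.)
def growingColor2 (grid : List (List Int)) : List (List Int) :=
  let h := grid.length
  let w := (grid.headD []).length
  let res := gridCopyA grid
  let res := (List.range' 1 (h - 1)).foldl (fun r i =>
    (List.range w).foldl (fun r j =>
      if pvGet2 grid i j == 2 then pvUpd2 r (i - 1) j 2 else r) r) res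
  let res := (List.range h).foldl (fun r k =>
    ((List.range (w - 1)).reverse).foldl (fun r l =>
      if pvGet2 grid k l == 2 then pvUpd2 r k (l + 1) 2 else r) r) res
  let res := ((List.range (h - 1)).reverse).foldl (fun r m =>
    (List.range w).foldl (fun r n =>
      if pvGet2 grid m n == 2 then pvUpd2 r (m + 1) n 2 else r) r) res
  let res := (List.range h).foldl (fun r o =>
    (List.range' 1 (w - 1)).foldl (fun r p =>
      if pvGet2 grid o p == 2 then pvUpd2 r o (p - 1) 2 else r) r) res
  res

-- ===== PORT B =====
-- literal port of B's out_cell helper: 2 if some in-bounds orthogonal neighbour of (i, j) is 2,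
-- else the original cell
def pvOutCell (grid : List (List Int)) (h i j : Nat) : Int :=
  if (decide (0 < i) && ((grid.getD (i - 1) []).getD j 0 == 2))
   || (decide (i + 1 < h) && ((grid.getD (i + 1) []).getD j 0 == 2))
   || (decide (0 < j) && ((grid.getD i []).getD (j - 1) 0 == 2))
   || (decide (j + 1 < (grid.getD i []).length) && ((grid.getD i []).getD (j + 1) 0 == 2))
  then 2 else (grid.getD i []).getD j 0

-- literal port of B: a pure nested comprehension, one value computed per output cell
def growingColor2_alt (grid : List (List Int)) : List (List Int) :=
  let h := grid.length
  (List.range h).map (fun i =>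
    (List.range (grid.getD i []).length).map (fun j => pvOutCell grid h i j))

-- ===== PRECONDITION & SPEC =====
-- Pre_ excludes exactly the ragged grids: A indexes every row with len(grid[0]) (and gridCopy
-- writes into rows of that width), so A raises IndexError on every non-rectangular grid.
def Pre_growingColor2 (grid : List (List Int)) : Prop :=
  ∀ row ∈ grid, row.length = (grid.headD []).length
instance (grid : List (List Int)) : Decidable (Pre_growingColor2 grid) := by unfold Pre_growingColor2; infer_instance

def pvWitness_growingColor2 : List (List Int) := [[2, 0, 0], [0, 0, 0], [0, 1, 2]]

def Spec_growingColor2 (grid : List (List Int)) (out : List (List Int)) : Prop := out = growingColor2_alt grid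
instance (grid : List (List Int)) (out : List (List Int)) : Decidable (Spec_growingColor2 grid out) := by unfold Spec_growingColor2; infer_instance

-- ===== CLAIM (what is proved, stated in full; the proofs are below) =====
def Claim_equal_growingColor2 : Prop := ∀ (grid : List (List Int)), Dom_growingColor2 grid → Pre_growingColor2 grid → Spec_growingColor2 grid (growingColor2 grid)

-- ===== LEMMAS AND PROOFS =====

-- (a, b) is an in-range cell of r
def pvInR (r : List (List Int)) (a b : Nat) : Bool :=
  a < r.length && b < (r.getD a []).length

-- apply a list of "write 2 at (i, j)" operations
def pvAppW (res : List (List Int)) (ws : List (Nat × Nat)) : List (List Int) :=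
  ws.foldl (fun r ij => pvUpd2 r ij.1 ij.2 2) res

-- cell (a, b) has an in-bounds orthogonal neighbour of colour 2
def pvNb (grid : List (List Int)) (a b : Nat) : Prop :=
  (a + 1 < grid.length ∧ b < (grid.headD []).length ∧ pvGet2 grid (a + 1) b = 2) ∨
  (a < grid.length ∧ 1 ≤ b ∧ b < (grid.headD []).length ∧ pvGet2 grid a (b - 1) = 2) ∨
  (1 ≤ a ∧ a < grid.length ∧ b < (grid.headD []).length ∧ pvGet2 grid (a - 1) b = 2) ∨
  (a < grid.length ∧ b + 1 < (grid.headD []).length ∧ pvGet2 grid a (b + 1) = 2)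

def pvG2? (r : List (List Int)) (a b : Nat) : Option Int :=
  r[a]?.bind (fun row => row[b]?)

-- A's write lists (one per pass, in A's order)
def pvW1 (grid : List (List Int)) : List (Nat × Nat) :=
  (List.range' 1 (grid.length - 1)).flatMap (fun i =>
    (List.range (grid.headD []).length).filterMap (fun j =>
      if pvGet2 grid i j == 2 then some (i - 1, j) else none))
def pvW2 (grid : List (List Int)) : List (Nat × Nat) :=
  (List.range grid.length).flatMap (fun k =>
    (((List.range ((grid.headD []).length - 1)).reverse)).filterMap (fun l =>
      if pvGet2 grid k l == 2 then some (k, l + 1) else none))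
def pvW3 (grid : List (List Int)) : List (Nat × Nat) :=
  ((List.range (grid.length - 1)).reverse).flatMap (fun m =>
    (List.range (grid.headD []).length).filterMap (fun n =>
      if pvGet2 grid m n == 2 then some (m + 1, n) else none))
def pvW4 (grid : List (List Int)) : List (Nat × Nat) :=
  (List.range grid.length).flatMap (fun o =>
    (List.range' 1 ((grid.headD []).length - 1)).filterMap (fun p =>
      if pvGet2 grid o p == 2 then some (o, p - 1) else none))

lemma pvUpd2_getElem? (r : List (List Int)) (i j a : Nat) (v : Int) :
    (pvUpd2 r i j v)[a]? = if a = i then r[a]?.map (fun row => row.set j v) else r[a]? := by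
  unfold pvUpd2
  by_cases h : a = i
  · subst h
    by_cases hl : a < r.length
    · simp [List.getElem?_set, hl, List.getD, List.getElem?_eq_getElem hl]
    · simp [List.getElem?_set, hl, List.getElem?_eq_none (by omega : r.length ≤ a)]
  · simp [List.getElem?_set, h, Ne.symm h]
lemma pvUpd2_shape (r : List (List Int)) (i j a : Nat) (v : Int) :
    (pvUpd2 r i j v)[a]?.map (List.length (α := Int)) = r[a]?.map (List.length (α := Int)) := by
  rw [pvUpd2_getElem?]
  by_cases h : a = i <;> simp [h, Option.map_map, Function.comp] <;> cases r[i]? <;> simp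
lemma pvUpd2_getD_len (r : List (List Int)) (i j a : Nat) (v : Int) :
    ((pvUpd2 r i j v)[a]?.getD []).length = (r[a]?.getD []).length := by
  rw [pvUpd2_getElem?]
  by_cases h : a = i <;> simp [h]
  cases r[i]? <;> simp

lemma pvInR_upd2 (r : List (List Int)) (i j a b : Nat) (v : Int) :
    pvInR (pvUpd2 r i j v) a b = pvInR r a b := by
  have h1 : (pvUpd2 r i j v).length = r.length := by simp [pvUpd2]
  simp [pvInR, h1, pvUpd2_getD_len]
lemma pvG2?_upd2 (r : List (List Int)) (i j a b : Nat) (v : Int) :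
    pvG2? (pvUpd2 r i j v) a b =
      if a = i ∧ b = j ∧ pvInR r i j then some v else pvG2? r a b := by
  unfold pvG2?
  rw [pvUpd2_getElem?]
  by_cases h : a = i
  · subst h
    by_cases hl : a < r.length
    · have e : r[a]? = some r[a] := List.getElem?_eq_getElem hl
      simp only [if_pos rfl, e, Option.map_some, Option.bind_some]
      by_cases hb : b = j
      · subst hb
        by_cases hj : b < r[a].length
        · simp [List.getElem?_set_self, hj, pvInR, hl, List.getD, e]
        · simp [List.getElem?_set, hj, pvInR, hl, List.getD, e, List.getElem?_eq_none (by omega : r[a].length ≤ b)]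
      · simp [List.getElem?_set, hb, Ne.symm hb]
    · have e : r[a]? = none := List.getElem?_eq_none (by omega)
      simp [e, pvInR, hl]
  · simp [h]

lemma pvAppW_append (res : List (List Int)) (ws ws' : List (Nat × Nat)) :
    pvAppW res (ws ++ ws') = pvAppW (pvAppW res ws) ws' := by
  simp [pvAppW, List.foldl_append]

lemma pvAppW_shape (res : List (List Int)) (ws : List (Nat × Nat)) (a : Nat) :
    (pvAppW res ws)[a]?.map (List.length (α := Int)) = res[a]?.map (List.length (α := Int)) := by
  induction ws generalizing res with
  | nil => rfl
  | cons w ws ih => rw [pvAppW, List.foldl_cons, ← pvAppW, ih, pvUpd2_shape]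
lemma pvG2?_appW (res : List (List Int)) (ws : List (Nat × Nat)) (a b : Nat) :
    pvG2? (pvAppW res ws) a b =
      if (a, b) ∈ ws ∧ pvInR res a b then some 2 else pvG2? res a b := by
  induction ws generalizing res with
  | nil => simp [pvAppW]
  | cons w ws ih =>
    rw [pvAppW, List.foldl_cons, ← pvAppW, ih, pvInR_upd2]
    by_cases hin : pvInR res a b
    · by_cases hm : (a, b) ∈ ws
      · rw [if_pos ⟨hm, hin⟩, if_pos ⟨List.mem_cons_of_mem w hm, hin⟩]
      · rw [if_neg (fun h => hm h.1), pvG2?_upd2]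
        by_cases hw : (a, b) = w
        · have ha : a = w.1 := by rw [← hw]
          have hb : b = w.2 := by rw [← hw]
          rw [if_pos ⟨ha, hb, by rw [← ha, ← hb]; exact hin⟩,
              if_pos ⟨by rw [hw]; exact List.mem_cons_self, hin⟩]
        · rw [if_neg (fun h => hw (by cases w; simp at h ⊢; exact ⟨h.1, h.2.1⟩)),
              if_neg (by
                intro h
                rcases List.mem_cons.mp h.1 with h1 | h1
                · exact hw h1
                · exact hm h1)]
    · rw [if_neg (fun h => hin h.2), if_neg (fun h => hin h.2), pvG2?_upd2,
          if_neg (by rintro ⟨rfl, rfl, h⟩; exact hin h)]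
lemma pvFoldl_cond {α : Type} (L : List α) (c : α → Bool) (pi pj : α → Nat) (res : List (List Int)) :
    L.foldl (fun r x => if c x then pvUpd2 r (pi x) (pj x) 2 else r) res
      = pvAppW res (L.filterMap (fun x => if c x then some (pi x, pj x) else none)) := by
  induction L generalizing res with
  | nil => rfl
  | cons x L ih =>
    rw [List.foldl_cons, List.filterMap_cons, ih]
    by_cases hc : c x <;> simp [hc, pvAppW]
lemma pvFoldl_appW {α : Type} (L : List α) (ws : α → List (Nat × Nat)) (res : List (List Int)) :
    L.foldl (fun r x => pvAppW r (ws x)) res = pvAppW res (L.flatMap ws) := by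
  induction L generalizing res with
  | nil => rfl
  | cons x L ih => rw [List.foldl_cons, List.flatMap_cons, pvAppW_append, ih]

-- A in normal form
lemma pvA_normal (grid : List (List Int)) :
    growingColor2 grid = pvAppW (gridCopyA grid) (pvW1 grid ++ pvW2 grid ++ pvW3 grid ++ pvW4 grid) := by
  simp only [growingColor2, pvW1, pvW2, pvW3, pvW4, pvFoldl_cond, pvFoldl_appW, pvAppW_append]

lemma pvRowFold (L : List Nat) (i : Nat) (g : Nat → Int) (res : List (List Int)) :
    L.foldl (fun r j => pvUpd2 r i j (g j)) res
      = res.set i (L.foldl (fun row j => row.set j (g j)) (res.getD i [])) := by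
  induction L generalizing res with
  | nil =>
    simp only [List.foldl_nil]
    by_cases hl : i < res.length
    · rw [List.getD_eq_getElem _ _ hl, List.set_getElem_self hl]
    · rw [List.set_eq_of_length_le (by omega)]
  | cons x L ih =>
    rw [List.foldl_cons, List.foldl_cons, ih, pvUpd2, List.set_set]
    congr 1
    by_cases hl : i < res.length
    · rw [List.getD_eq_getElem _ _ (by simpa using hl), List.getElem_set_self,
        List.getD_eq_getElem _ _ hl]
    · rw [List.getD_eq_default _ _ (by simpa using hl), List.getD_eq_default _ _ (by omega),
        List.set_nil]

lemma pvSetAll1D (m : Nat) (grid : List (List Int)) (i : Nat) (z : List Int) (hm : m ≤ z.length) :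
    (List.range m).foldl (fun row j => row.set j (pvGet2 grid i j)) z
      = (List.range m).map (fun j => pvGet2 grid i j) ++ z.drop m := by
  induction m with
  | zero => simp
  | succ m ih =>
    rw [List.range_succ, List.foldl_append, List.foldl_cons, List.foldl_nil, ih (by omega),
      List.set_append_right _ _ (by simp), List.map_append]
    simp only [List.length_map, List.length_range, Nat.sub_self]
    rw [List.drop_eq_getElem_cons (by omega : m < z.length), List.set_cons_zero]
    simp

lemma pvSetAll2D (k : Nat) (grid res : List (List Int)) (hk : k ≤ res.length) :
    (List.range k).foldl (fun r i =>
        r.set i ((List.range (grid.getD i []).length).foldl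
          (fun row j => row.set j (pvGet2 grid i j)) (r.getD i []))) res
      = (List.range k).map (fun i => (List.range (grid.getD i []).length).foldl
          (fun row j => row.set j (pvGet2 grid i j)) (res.getD i [])) ++ res.drop k := by
  induction k with
  | zero => simp
  | succ k ih =>
    rw [List.range_succ, List.foldl_append, List.foldl_cons, List.foldl_nil, ih (by omega),
      List.map_append]
    have hlen : ∀ l : List (List Int), (List.map (fun i => (List.range (grid.getD i []).length).foldl
        (fun row j => row.set j (pvGet2 grid i j)) (l.getD i [])) (List.range k)).length = k := by
      intro l; simp
    rw [List.getD_append_right _ _ _ _ (by rw [hlen]), hlen, Nat.sub_self,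
      List.drop_eq_getElem_cons (by omega : k < res.length),
      List.set_append_right _ _ (by rw [hlen]), hlen, Nat.sub_self, List.set_cons_zero]
    simp [List.getD_eq_getElem _ _ (show k < res.length by omega)]

-- gridCopy is the identity on rectangular grids
lemma pvCopy_eq (grid : List (List Int)) (hPre : Pre_growingColor2 grid) :
    gridCopyA grid = grid := by
  have hw : ∀ i : Nat, i < grid.length → (grid.getD i []).length = (grid.headD []).length := by
    intro i hi
    exact hPre _ (by rw [List.getD_eq_getElem _ _ hi]; exact List.getElem_mem hi)
  simp only [gridCopyA, pvRowFold]
  rw [pvSetAll2D _ _ _ (by simp), List.drop_eq_nil_of_le (by simp)]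
  apply List.ext_getElem (by simp)
  intro i hi hgi
  simp only [List.length_append, List.length_map, List.length_range, List.length_nil] at hi
  rw [List.getElem_append_left (by simpa using hi), List.getElem_map, List.getElem_range]
  rw [List.getD_replicate _ (by simpa using hi)]
  rw [pvSetAll1D _ grid i (List.replicate (grid.headD []).length 0)
      (by rw [List.length_replicate]; exact le_of_eq (hw i hgi)),
    List.drop_eq_nil_of_le (by rw [List.length_replicate]; exact le_of_eq (hw i hgi).symm),
    List.append_nil]
  apply List.ext_getElem (by simp [List.getElem?_eq_getElem hgi])
  intro j hj hgj
  simp only [List.length_map, List.length_range] at hj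
  rw [List.getElem_map, List.getElem_range]
  simp [pvGet2, List.getElem?_eq_getElem hgi, List.getElem?_eq_getElem hgj, List.getD]

lemma pvMem_W1 (grid : List (List Int)) (a b : Nat) :
    (a, b) ∈ pvW1 grid ↔
      (a + 1 < grid.length ∧ b < (grid.headD []).length ∧ pvGet2 grid (a + 1) b = 2) := by
  simp only [pvW1, List.mem_flatMap, List.mem_filterMap, List.mem_range, List.mem_range'_1,
    Option.ite_none_right_eq_some, Option.some.injEq, Prod.mk.injEq, beq_iff_eq]
  constructor
  · rintro ⟨i, hi, j, hj, h2, hia, hjb⟩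
    have he : i = a + 1 := by omega
    subst hjb; rw [he] at h2 hi
    exact ⟨by omega, hj, h2⟩
  · rintro ⟨h1, h2, h3⟩
    exact ⟨a + 1, by omega, b, h2, h3, by omega, rfl⟩

lemma pvMem_W2 (grid : List (List Int)) (a b : Nat) :
    (a, b) ∈ pvW2 grid ↔
      (a < grid.length ∧ 1 ≤ b ∧ b < (grid.headD []).length ∧ pvGet2 grid a (b - 1) = 2) := by
  simp only [pvW2, List.mem_flatMap, List.mem_filterMap, List.mem_range, List.mem_reverse,
    Option.ite_none_right_eq_some, Option.some.injEq, Prod.mk.injEq, beq_iff_eq]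
  constructor
  · rintro ⟨k, hk, l, hl, h2, hka, hlb⟩
    have he : l = b - 1 := by omega
    subst hka; rw [he] at h2
    exact ⟨hk, by omega, by omega, h2⟩
  · rintro ⟨h1, h2, h3, h4⟩
    exact ⟨a, h1, b - 1, by omega, h4, rfl, by omega⟩

lemma pvMem_W3 (grid : List (List Int)) (a b : Nat) :
    (a, b) ∈ pvW3 grid ↔
      (1 ≤ a ∧ a < grid.length ∧ b < (grid.headD []).length ∧ pvGet2 grid (a - 1) b = 2) := by
  simp only [pvW3, List.mem_flatMap, List.mem_filterMap, List.mem_range, List.mem_reverse,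
    Option.ite_none_right_eq_some, Option.some.injEq, Prod.mk.injEq, beq_iff_eq]
  constructor
  · rintro ⟨m, hm, n, hn, h2, hma, hnb⟩
    have he : m = a - 1 := by omega
    subst hnb; rw [he] at h2
    exact ⟨by omega, by omega, hn, h2⟩
  · rintro ⟨h1, h2, h3, h4⟩
    exact ⟨a - 1, by omega, b, h3, h4, by omega, rfl⟩

lemma pvMem_W4 (grid : List (List Int)) (a b : Nat) :
    (a, b) ∈ pvW4 grid ↔
      (a < grid.length ∧ b + 1 < (grid.headD []).length ∧ pvGet2 grid a (b + 1) = 2) := by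
  simp only [pvW4, List.mem_flatMap, List.mem_filterMap, List.mem_range, List.mem_range'_1,
    Option.ite_none_right_eq_some, Option.some.injEq, Prod.mk.injEq, beq_iff_eq]
  constructor
  · rintro ⟨o, ho, p, hp, h2, hoa, hpb⟩
    have he : p = b + 1 := by omega
    subst hoa; rw [he] at h2 hp
    exact ⟨ho, by omega, h2⟩
  · rintro ⟨h1, h2, h3⟩
    exact ⟨a, h1, b + 1, by omega, h3, rfl, by omega⟩

lemma pvMem_WA (grid : List (List Int)) (a b : Nat) :
    (a, b) ∈ pvW1 grid ++ pvW2 grid ++ pvW3 grid ++ pvW4 grid ↔ pvNb grid a b := by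
  simp only [List.mem_append, pvMem_W1, pvMem_W2, pvMem_W3, pvMem_W4, pvNb]
  tauto

-- B's cell value, characterised: 2 when a 2-neighbour exists, else the original cell
lemma pvOutCell_cond (grid : List (List Int)) (hPre : Pre_growingColor2 grid) (a b : Nat)
    (ha : a < grid.length) (hb : b < (grid.getD a []).length) :
    ((decide (0 < a) && ((grid.getD (a - 1) []).getD b 0 == 2))
       || (decide (a + 1 < grid.length) && ((grid.getD (a + 1) []).getD b 0 == 2))
       || (decide (0 < b) && ((grid.getD a []).getD (b - 1) 0 == 2))
       || (decide (b + 1 < (grid.getD a []).length) && ((grid.getD a []).getD (b + 1) 0 == 2))) = true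
      ↔ pvNb grid a b := by
  have hw : ∀ i : Nat, i < grid.length → (grid.getD i []).length = (grid.headD []).length := by
    intro i hi
    exact hPre _ (by rw [List.getD_eq_getElem _ _ hi]; exact List.getElem_mem hi)
  have hb' : b < (grid.headD []).length := by rw [← hw a ha]; exact hb
  simp only [Bool.or_eq_true, Bool.and_eq_true, decide_eq_true_eq, beq_iff_eq, pvNb, pvGet2]
  rw [hw a ha]
  constructor
  · rintro (((⟨h1, h2⟩ | ⟨h1, h2⟩) | ⟨h1, h2⟩) | ⟨h1, h2⟩)
    · exact Or.inr (Or.inr (Or.inl ⟨by omega, ha, hb', h2⟩))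
    · exact Or.inl ⟨h1, hb', h2⟩
    · exact Or.inr (Or.inl ⟨ha, by omega, hb', h2⟩)
    · exact Or.inr (Or.inr (Or.inr ⟨ha, h1, h2⟩))
  · rintro (⟨h1, h2, h3⟩ | ⟨h1, h2, h3, h4⟩ | ⟨h1, h2, h3, h4⟩ | ⟨h1, h2, h3⟩)
    · exact Or.inl (Or.inl (Or.inr ⟨h1, h3⟩))
    · exact Or.inl (Or.inr ⟨by omega, h4⟩)
    · exact Or.inl (Or.inl (Or.inl ⟨by omega, h4⟩))
    · exact Or.inr ⟨h2, h3⟩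

lemma pvOutCell_pos (grid : List (List Int)) (hPre : Pre_growingColor2 grid) (a b : Nat)
    (ha : a < grid.length) (hb : b < (grid.getD a []).length) (hNb : pvNb grid a b) :
    pvOutCell grid grid.length a b = 2 := by
  unfold pvOutCell
  rw [if_pos ((pvOutCell_cond grid hPre a b ha hb).mpr hNb)]

lemma pvOutCell_neg (grid : List (List Int)) (hPre : Pre_growingColor2 grid) (a b : Nat)
    (ha : a < grid.length) (hb : b < (grid.getD a []).length) (hNb : ¬ pvNb grid a b) :
    pvOutCell grid grid.length a b = pvGet2 grid a b := by
  unfold pvOutCell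
  rw [if_neg (fun h => hNb ((pvOutCell_cond grid hPre a b ha hb).mp h))]
  rfl

lemma pvAlt_getElem? (grid : List (List Int)) (a : Nat) :
    (growingColor2_alt grid)[a]? =
      if a < grid.length then
        some ((List.range (grid.getD a []).length).map (fun j => pvOutCell grid grid.length a j))
      else none := by
  unfold growingColor2_alt
  by_cases ha : a < grid.length
  · rw [List.getElem?_map, List.getElem?_range ha, if_pos ha]
    rfl
  · rw [List.getElem?_map, List.getElem?_eq_none (by simpa using (by omega : grid.length ≤ a)), if_neg ha]
    rfl

lemma pvG2?_grid (grid : List (List Int)) (a b : Nat)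
    (ha : a < grid.length) (hb : b < (grid.getD a []).length) :
    pvG2? grid a b = some (pvGet2 grid a b) := by
  have e : grid[a]? = some grid[a] := List.getElem?_eq_getElem ha
  have hb2 : b < grid[a].length := by
    rw [List.getD_eq_getElem _ _ ha] at hb; exact hb
  simp [pvG2?, pvGet2, e, List.getElem?_eq_getElem hb2, List.getD, List.getD_eq_getElem _ _ ha]

lemma pvEq_of_pointwise (r s : List (List Int))
    (hsh : ∀ a : Nat, r[a]?.map (List.length (α := Int)) = s[a]?.map (List.length (α := Int)))
    (hpt : ∀ a b, pvG2? r a b = pvG2? s a b) : r = s := by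
  apply List.ext_getElem?
  intro a
  have h1 := hsh a
  cases hr : r[a]? with
  | none => cases hs : s[a]? with
    | none => rfl
    | some row => rw [hr, hs] at h1; simp at h1
  | some row1 => cases hs : s[a]? with
    | none => rw [hr, hs] at h1; simp at h1
    | some row2 =>
      rw [hr, hs] at h1
      simp only [Option.map_some, Option.some.injEq] at h1
      congr 1
      apply List.ext_getElem?
      intro b
      have h2 := hpt a b
      rw [pvG2?, pvG2?, hr, hs] at h2
      simpa using h2

-- ===== VERDICT (by name: the statement is the Claim_ definition above) =====
theorem growingColor2_spec : Claim_equal_growingColor2 := by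
  intro grid _ hPre
  unfold Spec_growingColor2
  rw [pvA_normal, pvCopy_eq grid hPre]
  apply pvEq_of_pointwise
  · intro a
    rw [pvAppW_shape, pvAlt_getElem?]
    by_cases ha : a < grid.length
    · rw [if_pos ha, List.getElem?_eq_getElem ha]
      simp [List.getD, List.getElem?_eq_getElem ha]
    · rw [if_neg ha, List.getElem?_eq_none (by omega)]
  · intro a b
    rw [pvG2?_appW]
    by_cases ha : a < grid.length
    · have hD : grid.getD a [] = grid[a] := List.getD_eq_getElem _ _ ha
      by_cases hb : b < (grid.getD a []).length
      · have hin : pvInR grid a b = true := by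
          simp only [pvInR, Bool.and_eq_true, decide_eq_true_eq]
          exact ⟨ha, hb⟩
        have hBrow : ((List.range (grid.getD a []).length).map
            (fun j => pvOutCell grid grid.length a j))[b]? = some (pvOutCell grid grid.length a b) := by
          rw [List.getElem?_map, List.getElem?_range hb]
          rfl
        have hBval : pvG2? (growingColor2_alt grid) a b = some (pvOutCell grid grid.length a b) := by
          unfold pvG2?
          rw [pvAlt_getElem?, if_pos ha, Option.bind_some, hBrow]
        rw [hBval]
        by_cases hmem : pvNb grid a b
        · rw [if_pos ⟨(pvMem_WA grid a b).mpr hmem, hin⟩,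
            pvOutCell_pos grid hPre a b ha hb hmem]
        · rw [if_neg (fun h => hmem ((pvMem_WA grid a b).mp h.1)),
            pvOutCell_neg grid hPre a b ha hb hmem, pvG2?_grid grid a b ha hb]
      · have hin : ¬ (pvInR grid a b = true) := by
          simp only [pvInR, Bool.and_eq_true, decide_eq_true_eq]
          rintro ⟨-, h⟩
          exact hb h
        rw [if_neg (fun h => hin h.2)]
        have h1 : pvG2? grid a b = none := by
          unfold pvG2?
          rw [List.getElem?_eq_getElem ha, Option.bind_some,
            List.getElem?_eq_none (show grid[a].length ≤ b by rw [← hD]; omega)]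
        have h2 : pvG2? (growingColor2_alt grid) a b = none := by
          unfold pvG2?
          rw [pvAlt_getElem?, if_pos ha, Option.bind_some,
            List.getElem?_eq_none (by rw [List.length_map, List.length_range]; omega)]
        rw [h1, h2]
    · have hin : ¬ (pvInR grid a b = true) := by
        simp only [pvInR, Bool.and_eq_true, decide_eq_true_eq]
        rintro ⟨h, -⟩
        exact ha h
      rw [if_neg (fun h => hin h.2)]
      unfold pvG2?
      rw [pvAlt_getElem?, if_neg ha, List.getElem?_eq_none (show grid.length ≤ a by omega)]
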